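-- pv_equiv track=rewrite | github.com/DreamWall-Animation/dwpicker | dwpicker/ingest/animschool/converter.py | _label_width
-- ===== SOURCE A (Python) =====
-- def _label_width(text):
--     width = 0
--     for letter in text:
--         if letter == " ":
--             width += 3
--         elif letter.isupper():
--             width += 7
--         else:
--             width += 6
--     return width
-- ===== SOURCE B (Python) =====
-- def _label_width(text):
--     return 6 * len(text) + sum(1 for c in text if c.isupper()) - 3 * text.count(' ')
-- ===== Notes on version B (the rewrite author's own statement) =====
-- stated objective: simpler
-- what changed: Replaces the per-character conditional accumulation loop with a one-line closed form over three aggregates: 6*len(text) plus the uppercase count minus 3 times the space count.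
import Mathlib
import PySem

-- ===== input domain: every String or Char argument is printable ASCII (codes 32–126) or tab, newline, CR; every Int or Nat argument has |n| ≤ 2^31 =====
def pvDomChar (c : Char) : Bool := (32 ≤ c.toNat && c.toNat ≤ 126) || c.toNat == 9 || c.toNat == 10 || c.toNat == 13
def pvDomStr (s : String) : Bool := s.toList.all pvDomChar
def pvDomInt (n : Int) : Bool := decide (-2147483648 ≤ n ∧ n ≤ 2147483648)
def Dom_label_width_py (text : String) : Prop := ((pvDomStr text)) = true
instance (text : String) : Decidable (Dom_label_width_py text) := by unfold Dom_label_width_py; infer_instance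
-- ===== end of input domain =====

-- B replaces A's conditional-accumulation loop by a closed form over three aggregates (length, uppercase count, space count); same cost, simpler.

-- ===== PORT A =====
-- width = 0; for letter in text: width += 3 / 7 / 6
def label_width_py (text : String) : Int :=
  text.toList.foldl
    (fun width letter =>
      if letter == ' ' then width + 3
      else if PySem.Chars.isupper letter then width + 7
      else width + 6) 0

-- ===== PORT B =====
-- 6*len(text) + sum(1 for c in text if c.isupper()) - 3*text.count(' ')
-- (text.count(' ') counts a single-character substring, which equals the number of ' ' characters)
def label_width_py_alt (text : String) : Int :=
  6 * (text.toList.length : Int)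
    + ((text.toList.countP PySem.Chars.isupper : Nat) : Int)
    - 3 * ((text.toList.count ' ' : Nat) : Int)

-- ===== PRECONDITION & SPEC =====
def Spec_label_width_py (text : String) (out : Int) : Prop := out = label_width_py_alt text
instance (text : String) (out : Int) : Decidable (Spec_label_width_py text out) := by unfold Spec_label_width_py; infer_instance

-- ===== CLAIM (what is proved, stated in full; the proofs are below) =====
def Claim_equal_label_width_py : Prop := ∀ (text : String), Dom_label_width_py text → Spec_label_width_py text (label_width_py text)

-- ===== LEMMAS AND PROOFS =====

theorem label_width_foldl (cs : List Char) (w : Int) :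
    cs.foldl
      (fun width letter =>
        if letter == ' ' then width + 3
        else if PySem.Chars.isupper letter then width + 7
        else width + 6) w
    = w + 6 * (cs.length : Int) + ((cs.countP PySem.Chars.isupper : Nat) : Int)
        - 3 * ((cs.count ' ' : Nat) : Int) := by
  induction cs generalizing w with
  | nil => simp
  | cons c cs ih =>
    simp only [List.foldl_cons, List.length_cons, List.countP_cons, List.count_cons, ih]
    by_cases hsp : c = ' '
    · subst hsp
      have : PySem.Chars.isupper ' ' = false := by decide
      simp [this]
      ring
    · have hne : (c == ' ') = false := by simp [hsp]
      by_cases hup : PySem.Chars.isupper c = true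
      · simp [hne, hup]
        ring
      · simp [hne, hup]
        ring

-- ===== VERDICT (by name: the statement is the Claim_ definition above) =====
theorem label_width_py_spec : Claim_equal_label_width_py := by
  intro text _
  unfold Spec_label_width_py label_width_py label_width_py_alt
  rw [label_width_foldl]
  ring
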